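-- pv_equiv track=rewrite | github.com/dnjswoc/algorithm-problem | SWEA/adv_1w/day4/4873_remake/4873_remake.py | continuous_password
-- ===== SOURCE A (Python) =====
-- def continuous_password(password):  # 연속문자 탐색하는 악질함수
--     cnt = 1
--     total = 0
--
--     res = list(map(lambda ch: ord(ch), password))  # ord 문자열을 숫자로 바꿔주는 내장함수
--
--     for i in range(1, len(res)):
--         if res[i] == res[i - 1] + 1:  # 연속인지 알아보기 위함
--             cnt += 1
--         else:
--             if cnt > 1:
--                 total += cnt
--                 cnt = 1
--     else:
--         if cnt > 1:  # 하... 할말하않 ㅋㅋㅋㅋㅋㅋㅋㅋㅋㅋ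
--             total += cnt
--
--     return total
-- ===== SOURCE B (Python) =====
-- def continuous_password(password):
--     # Count characters that have a consecutive-ordinal neighbour:
--     # total = number of indices belonging to a run of length >= 2.
--     a = list(map(ord, password))
--     flags = [y == x + 1 for x, y in zip(a, a[1:])]
--     total = 0
--     prev = False
--     for f in flags:
--         total += prev or f
--         prev = f
--     return total + prev
-- ===== Notes on version B (the rewrite author's own statement) =====
-- stated objective: simpler
-- what changed: Replaces A's run-length accumulator with reset logic by two passes: compute consecutive-neighbour flags for adjacent pairs, then count each character that has a consecutive neighbour (left or previous flag), which equals the sum of run lengths >= 2.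
import Mathlib
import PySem

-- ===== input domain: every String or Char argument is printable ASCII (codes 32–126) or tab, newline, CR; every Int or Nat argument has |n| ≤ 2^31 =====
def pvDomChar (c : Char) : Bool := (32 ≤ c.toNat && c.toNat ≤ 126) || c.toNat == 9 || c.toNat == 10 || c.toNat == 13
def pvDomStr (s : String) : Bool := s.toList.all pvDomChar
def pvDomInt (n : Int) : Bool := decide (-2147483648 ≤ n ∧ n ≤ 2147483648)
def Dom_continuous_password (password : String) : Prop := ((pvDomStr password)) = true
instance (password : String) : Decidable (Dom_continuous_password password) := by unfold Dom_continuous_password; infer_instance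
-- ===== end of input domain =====

-- B recounts the total as the number of characters having a consecutive-ordinal
-- neighbour (two passes: neighbour flags, then a count), replacing A's
-- run-length accumulator with its reset logic; objective: simpler.

-- ===== PORT A =====
def continuous_password (password : String) : Int :=
  let res : List Int := password.toList.map (fun ch => (ch.toNat : Int))
  let st : Int × Int :=
    (PySem.List.pyRange 1 (res.length : Int) 1).foldl
      (fun st i =>
        if PySem.List.pyGetD res i 0 = PySem.List.pyGetD res (i - 1) 0 + 1 then
          (st.1 + 1, st.2)
        else if st.1 > 1 then (1, st.2 + st.1) else st)
      (1, 0)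
  if st.1 > 1 then st.2 + st.1 else st.2

-- ===== PORT B =====
def continuous_password_alt (password : String) : Int :=
  let a : List Int := password.toList.map (fun ch => (ch.toNat : Int))
  let flags : List Bool := (a.zip a.tail).map (fun p => decide (p.2 = p.1 + 1))
  let st : Int × Bool :=
    flags.foldl (fun st f => (st.1 + (if st.2 || f then 1 else 0), f)) (0, false)
  st.1 + (if st.2 then 1 else 0)

-- ===== PRECONDITION & SPEC =====
def Spec_continuous_password (password : String) (out : Int) : Prop := out = continuous_password_alt password
instance (password : String) (out : Int) : Decidable (Spec_continuous_password password out) := by unfold Spec_continuous_password; infer_instance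

-- ===== CLAIM (what is proved, stated in full; the proofs are below) =====
def Claim_equal_continuous_password : Prop := ∀ (password : String), Dom_continuous_password password → Spec_continuous_password password (continuous_password password)

-- ===== LEMMAS AND PROOFS =====

-- The list of adjacent pairs, read off by index, is `zip` with the tail.
lemma pairs_eq (res : List Int) :
    (List.range (res.length - 1)).map (fun k => (res.getD k 0, res.getD (k + 1) 0))
      = res.zip res.tail := by
  apply List.ext_getElem
  · simp [List.length_zip]
  · intro k h1 h2
    have hk : k < res.length - 1 := by simpa using h1
    have hk0 : k < res.length := by omega
    have hk1 : k + 1 < res.length := by omega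
    simp [List.getElem_zip, List.getElem_tail, List.getD, hk0, hk1]

-- A's index loop over range(1, len) is the same fold over the adjacent pairs.
lemma a_fold_pairs (res : List Int) (init : Int × Int) :
    (PySem.List.pyRange 1 (res.length : Int) 1).foldl
      (fun st i =>
        if PySem.List.pyGetD res i 0 = PySem.List.pyGetD res (i - 1) 0 + 1 then
          (st.1 + 1, st.2)
        else if st.1 > 1 then (1, st.2 + st.1) else st) init
    = (res.zip res.tail).foldl
      (fun st p =>
        if p.2 = p.1 + 1 then (st.1 + 1, st.2)
        else if st.1 > 1 then (1, st.2 + st.1) else st) init := by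
  rw [PySem.List.pyRange_one]
  have hlen : ((res.length : Int) - 1).toNat = res.length - 1 := by omega
  rw [hlen, List.foldl_map, ← pairs_eq res, List.foldl_map]
  have hfun : (fun (st : Int × Int) (k : Nat) =>
      if PySem.List.pyGetD res (1 + (k : Int)) 0
          = PySem.List.pyGetD res (1 + (k : Int) - 1) 0 + 1 then (st.1 + 1, st.2)
      else if st.1 > 1 then (1, st.2 + st.1) else st)
      = (fun (st : Int × Int) (k : Nat) =>
      if res.getD (k + 1) 0 = res.getD k 0 + 1 then (st.1 + 1, st.2)
      else if st.1 > 1 then (1, st.2 + st.1) else st) := by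
    funext st k
    have e1 : (1 : Int) + (k : Int) = ((k + 1 : Nat) : Int) := by push_cast; ring
    have e2 : (1 : Int) + (k : Int) - 1 = ((k : Nat) : Int) := by ring
    rw [e1]
    rw [show ((k + 1 : Nat) : Int) - 1 = ((k : Nat) : Int) by push_cast; ring]
    rw [PySem.List.pyGetD_natCast, PySem.List.pyGetD_natCast]
  rw [hfun]

-- Core invariant: A's (cnt, total) state and B's (count, prev) state describe
-- the same running total over the same pair stream.
lemma core (ps : List (Int × Int)) (cnt total tot : Int) (prev : Bool)
    (h1 : 1 ≤ cnt) (h2 : prev = decide (1 < cnt))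
    (h3 : total + (if 1 < cnt then cnt else 0) = tot + (if prev then 1 else 0)) :
    (let stA := ps.foldl
        (fun st p =>
          if p.2 = p.1 + 1 then (st.1 + 1, st.2)
          else if st.1 > 1 then (1, st.2 + st.1) else st) (cnt, total);
      if stA.1 > 1 then stA.2 + stA.1 else stA.2)
    = (let stB := ps.foldl
        (fun st p => (st.1 + (if st.2 || decide (p.2 = p.1 + 1) then 1 else 0),
                      decide (p.2 = p.1 + 1))) (tot, prev);
      stB.1 + (if stB.2 then 1 else 0)) := by
  induction ps generalizing cnt total tot prev with
  | nil =>
    subst h2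
    simp only [List.foldl_nil]
    by_cases h : 1 < cnt <;> simp [h] at h3 ⊢ <;> omega
  | cons p ps ih =>
    subst h2
    simp only [List.foldl_cons]
    by_cases hf : p.2 = p.1 + 1 <;> by_cases hc : 1 < cnt
    · simp only [hf, decide_true, Bool.or_true, if_true]
      exact ih (cnt + 1) total (tot + 1) true (by omega)
        (by simp; omega)
        (by simp at h3; simp [show (1:Int) < cnt + 1 by omega]; omega)
    · have hcnt : cnt = 1 := by omega
      subst hcnt
      simp only [hf, decide_true, Bool.or_true, if_true]
      exact ih 2 total (tot + 1) true (by omega)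
        (by simp)
        (by simp at h3; simp; omega)
    · simp only [if_neg hf, decide_eq_false hf, Bool.or_false, gt_iff_lt, if_pos hc,
        decide_eq_true hc, if_true]
      exact ih 1 (total + cnt) (tot + 1) false (by omega) (by simp)
        (by simp at h3; simp; omega)
    · have hcnt : cnt = 1 := by omega
      subst hcnt
      simp only [if_neg hf, decide_eq_false hf, Bool.or_false]
      have : decide ((1:Int) < 1) = false := by simp
      rw [this]
      simp only [gt_iff_lt, if_neg hc, Bool.false_eq_true, if_false, add_zero]
      exact ih 1 total tot false (by omega) (by simp)
        (by simp at h3; simp; omega)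

-- ===== VERDICT (by name: the statement is the Claim_ definition above) =====
theorem continuous_password_spec : Claim_equal_continuous_password := by
  intro password _
  unfold Spec_continuous_password continuous_password continuous_password_alt
  simp only [a_fold_pairs, List.foldl_map]
  exact core _ 1 0 0 false (by omega) (by simp) (by simp)
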